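-- pv_equiv track=rewrite | github.com/lenkasokova/VUT-FIT-IVS-project-2 | repo/repo/src/calculator/GUI_mediator.py | check_str_number
-- ===== SOURCE A (Python) =====
-- def check_str_number(str_number):
--     """ Check string number
--
--     Check if a string str_number can be convert to int or float
--
--     :param str_number: string
--     :return: true if str_number can be convert tot int or float else return false
--     """
--     number = ""
--     float_number = False
--
--     for i in range(len(str_number)):
--         if str_number[i].isdigit():
--             number += str_number[i]
--
--         # Check if it is a float number
--         elif str_number[i] == '.' and not float_number and number:
--             number += str_number[i]
--             float_number = True
--
--         else:
--             return False
--
--     return True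
-- ===== SOURCE B (Python) =====
-- def check_str_number(str_number):
--     """ Check if a string can be converted to int or float (same contract as A). """
--     parts = str_number.split('.')
--     if len(parts) == 1:
--         return parts[0] == '' or parts[0].isdigit()
--     if len(parts) == 2:
--         left, right = parts
--         return left.isdigit() and (right == '' or right.isdigit())
--     return False
-- ===== Notes on version B (the rewrite author's own statement) =====
-- stated objective: simpler
-- what changed: B splits the string at the dot character and validates each part with isdigit, branching on the number of parts, instead of A's char-by-char scan carrying an accumulator string and a float-seen flag.
import Mathlib
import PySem

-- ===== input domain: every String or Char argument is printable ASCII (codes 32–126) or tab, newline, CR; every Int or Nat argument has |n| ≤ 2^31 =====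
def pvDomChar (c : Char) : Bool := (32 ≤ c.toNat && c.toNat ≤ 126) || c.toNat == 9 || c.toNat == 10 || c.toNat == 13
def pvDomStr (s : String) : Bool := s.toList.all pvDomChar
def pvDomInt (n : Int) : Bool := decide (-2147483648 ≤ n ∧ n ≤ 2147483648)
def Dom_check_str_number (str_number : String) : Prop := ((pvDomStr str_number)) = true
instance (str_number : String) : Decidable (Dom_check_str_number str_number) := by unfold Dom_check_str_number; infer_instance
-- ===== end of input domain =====

-- B replaces A's char-by-char scan with a float-seen flag by a split at the dot and
-- per-part isdigit validation (objective: simpler decomposition, same cost).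

-- ===== PORT A =====
-- literal transliteration of A's loop: `number` accumulator and `float_number` flag;
-- an early `return False` becomes the final `false` branch of the recursion.
def checkGoA : List Char → List Char → Bool → Bool
  | [], _, _ => true
  | c :: rest, number, float_number =>
    if PySem.Chars.isdigit c then
      checkGoA rest (number ++ [c]) float_number
    else if c == '.' && !float_number && !number.isEmpty then
      checkGoA rest (number ++ [c]) true
    else
      false

def check_str_number (str_number : String) : Bool :=
  checkGoA str_number.toList [] false

-- ===== PORT B =====
-- Source B: parts = str_number.split('.'); branch on the number of parts.
def check_str_number_alt (str_number : String) : Bool :=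
  match List.splitOn '.' str_number.toList with
  | [p] => p.isEmpty || PySem.Chars.strIsdigit p
  | [l, r] => PySem.Chars.strIsdigit l && (r.isEmpty || PySem.Chars.strIsdigit r)
  | _ => false

-- ===== PRECONDITION & SPEC =====
def Spec_check_str_number (str_number : String) (out : Bool) : Prop := out = check_str_number_alt str_number
instance (str_number : String) (out : Bool) : Decidable (Spec_check_str_number str_number out) := by unfold Spec_check_str_number; infer_instance

-- ===== CLAIM (what is proved, stated in full; the proofs are below) =====
def Claim_equal_check_str_number : Prop := ∀ (str_number : String), Dom_check_str_number str_number → Spec_check_str_number str_number (check_str_number str_number)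

-- ===== LEMMAS AND PROOFS =====

-- once the float flag is set, A accepts exactly a string of digits
theorem checkGoA_true (cs : List Char) (num : List Char) :
    checkGoA cs num true = cs.all PySem.Chars.isdigit := by
  induction cs generalizing num with
  | nil => rfl
  | cons c rest ih =>
    simp only [checkGoA, List.all_cons]
    by_cases h : PySem.Chars.isdigit c = true
    · simp [h, ih]
    · simp [h]

theorem dot_not_digit : PySem.Chars.isdigit '.' = false := by decide

theorem splitOn_single_eq {cs r : List Char} (h : List.splitOn '.' cs = [r]) : r = cs := by
  have := List.intercalate_splitOn cs '.'
  rw [h] at this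
  simpa [List.intercalate] using this

theorem mem_of_splitOn_long {cs : List Char} {l r : List Char} {rest : List (List Char)}
    (h : List.splitOn '.' cs = l :: r :: rest) : '.' ∈ cs := by
  by_contra hm
  have : List.splitOn '.' cs = [cs] := by
    simpa [List.splitOn] using List.splitOnP_eq_single (fun x => x == '.') cs
      (by intro x hx hbeq; exact hm (by simpa using (by simpa using hbeq : x = '.') ▸ hx))
  rw [this] at h
  simp at h

-- the main invariant: A's loop with flag unset, described by the split of the rest
theorem checkGoA_false (cs : List Char) (num : List Char) :
    checkGoA cs num false =
      (match List.splitOn '.' cs with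
       | [p] => p.all PySem.Chars.isdigit
       | [l, r] => l.all PySem.Chars.isdigit && !(num.isEmpty && l.isEmpty)
                     && r.all PySem.Chars.isdigit
       | _ => false) := by
  induction cs generalizing num with
  | nil => simp [checkGoA, List.splitOn]
  | cons c rest ih =>
    rcases hsp : List.splitOn '.' rest with _ | ⟨p, ps⟩
    · exact absurd hsp (by simpa [List.splitOn] using List.splitOnP_ne_nil (fun x => x == '.') rest)
    by_cases hd : PySem.Chars.isdigit c = true
    · have hne : (c == '.') = false := by
        have : c ≠ '.' := by intro h; rw [h] at hd; simp [dot_not_digit] at hd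
        simpa using this
      have hstep : List.splitOn '.' (c :: rest) =
          List.modifyHead (List.cons c) (List.splitOn '.' rest) := by
        simp [List.splitOn, List.splitOnP_cons, hne]
      have hL : checkGoA (c :: rest) num false = checkGoA rest (num ++ [c]) false := by
        simp [checkGoA, hd]
      rw [hL, ih, hsp, hstep, hsp]
      have hnum : (num ++ [c]).isEmpty = false := by simp
      rcases ps with _ | ⟨q, qs⟩
      · simp [hd]
      · rcases qs with _ | _
        · simp [hd, hnum]
        · simp
    · have hdf : PySem.Chars.isdigit c = false := by simpa using hd
      by_cases hc : c = '.'
      · subst hc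
        have hstep : List.splitOn '.' ('.' :: rest) = [] :: List.splitOn '.' rest := by
          simp [List.splitOn, List.splitOnP_cons]
        rw [hstep, hsp]
        by_cases hn : num.isEmpty
        · have hL : checkGoA ('.' :: rest) num false = false := by
            simp [checkGoA, hdf, hn]
          rw [hL]
          rcases ps with _ | ⟨q, qs⟩
          · simp [hn]
          · simp
        · have hnf : num.isEmpty = false := by simpa using hn
          have hL : checkGoA ('.' :: rest) num false = checkGoA rest (num ++ ['.']) true := by
            simp [checkGoA, hdf, hnf]
          rw [hL, checkGoA_true]
          rcases ps with _ | ⟨q, qs⟩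
          · have := splitOn_single_eq hsp
            subst this
            simp [hnf]
          · have hm : '.' ∈ rest := mem_of_splitOn_long hsp
            have hall : rest.all PySem.Chars.isdigit = false := by
              simp only [List.all_eq_false]
              exact ⟨'.', hm, by simp [dot_not_digit]⟩
            rcases qs with _ | _ <;> simp [hall]
      · have hne : (c == '.') = false := by simpa using hc
        have hstep : List.splitOn '.' (c :: rest) =
            List.modifyHead (List.cons c) (List.splitOn '.' rest) := by
          simp [List.splitOn, List.splitOnP_cons, hne]
        have hL : checkGoA (c :: rest) num false = false := by
          simp [checkGoA, hdf, hne]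
        rw [hL, hstep, hsp]
        rcases ps with _ | ⟨q, qs⟩
        · simp [hdf]
        · rcases qs with _ | _
          · simp [hdf]
          · simp

-- ===== VERDICT (by name: the statement is the Claim_ definition above) =====
theorem check_str_number_spec : Claim_equal_check_str_number := by
  intro s _
  show check_str_number s = check_str_number_alt s
  unfold check_str_number check_str_number_alt
  rw [checkGoA_false]
  rcases hsp : List.splitOn '.' s.toList with _ | ⟨p, ps⟩
  · exact absurd hsp (by simpa [List.splitOn] using List.splitOnP_ne_nil (fun x => x == '.') s.toList)
  · rcases ps with _ | ⟨q, qs⟩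
    · rcases p with _ | _ <;> simp [PySem.Chars.strIsdigit]
    · rcases qs with _ | _
      · rcases p with _ | _ <;> rcases q with _ | _ <;>
          simp [PySem.Chars.strIsdigit, Bool.and_comm, Bool.and_assoc, Bool.and_left_comm]
      · simp
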